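-- pv_equiv track=rewrite | github.com/nanapeng/AY20_MBDS_questions | question1/question1.py | solution
-- ===== SOURCE A (Python) =====
-- def solution(m, n, desired_sum):
--     col_sum = 0
--     num = []
--     for i in range(1, m + 1):
--         col_sum = col_sum + i
--         num.append(i)  # put the consecutive numbers that must be selected in the column into num
--
--     row_sum = desired_sum - col_sum
--     row_num = n - 1  # number of values need to be selected to meet row sum
--
--     # take special values according to restrictios(row sum and number of values)
--     num1 = row_sum // row_num
--     num2 = num1 + row_sum % row_num
--
--     # put numbers in num, and arrange chosen numbers in ascending order
--     for i in range(n - 2):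
--         num.append(num1)
--
--     num.append(num2)
--     num.sort()
--
--     # associate numerical changes with right and down operations, operations is one less than values
--     for i in range(len(num) - 1):
--         if num[i] == num[i + 1]:
--             num[i] = "R"
--         else:
--             num[i] = "D"
--
--     num.pop()  # delete last value
--     num = "".join(num)
--     return num
-- ===== SOURCE B (Python) =====
-- def solution(m, n, desired_sum):
--     # Gauss closed form for the column sum (loop in A); empty range for m <= 0
--     col_sum = m * (m + 1) // 2 if m > 0 else 0
--     row_sum = desired_sum - col_sum
--     row_num = n - 1
--     num1 = row_sum // row_num
--     num2 = num1 + row_sum % row_num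
--     left = list(range(1, m + 1))          # already sorted
--     right = [num1] * (n - 2) + [num2]     # already sorted (num1 <= num2 when nonempty beyond num2)
--     # linear-time merge of the two sorted runs instead of a full sort
--     merged = []
--     i = j = 0
--     while i < len(left) and j < len(right):
--         if left[i] <= right[j]:
--             merged.append(left[i]); i += 1
--         else:
--             merged.append(right[j]); j += 1
--     merged.extend(left[i:])
--     merged.extend(right[j:])
--     return "".join("R" if x == y else "D" for x, y in zip(merged, merged[1:]))
-- ===== Notes on version B (the rewrite author's own statement) =====
-- stated objective: alternative
-- what changed: B replaces A's sort of the concatenated list by a linear two-pointer merge of the two already-sorted runs, computes the column sum with a guarded Gauss closed form instead of a loop, and derives the R/D string from zipped adjacent pairs instead of overwriting list cells in place.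
import Mathlib
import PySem

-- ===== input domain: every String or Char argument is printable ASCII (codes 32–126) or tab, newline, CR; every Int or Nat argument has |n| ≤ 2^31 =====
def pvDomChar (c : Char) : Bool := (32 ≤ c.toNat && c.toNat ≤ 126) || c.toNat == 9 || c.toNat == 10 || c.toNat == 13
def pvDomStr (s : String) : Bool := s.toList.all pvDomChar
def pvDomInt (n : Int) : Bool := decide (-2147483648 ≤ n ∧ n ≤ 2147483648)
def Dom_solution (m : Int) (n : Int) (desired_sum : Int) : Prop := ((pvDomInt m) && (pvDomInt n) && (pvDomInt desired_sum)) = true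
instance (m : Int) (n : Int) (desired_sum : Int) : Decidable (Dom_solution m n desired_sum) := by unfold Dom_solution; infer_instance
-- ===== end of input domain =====

-- B replaces A's full sort of the concatenation by a linear two-pointer merge of the two
-- already-sorted runs, a guarded Gauss closed form for the column sum, and a zip-of-adjacent-
-- pairs pass instead of A's in-place index overwriting (objective: alternative algorithm).

-- ===== PORT A =====
-- Port notes: the final Python loop overwrites num[i] with "R"/"D"; iteration i reads indices
-- i and i+1, which no earlier iteration wrote, so every read sees the original int; we
-- accumulate the written strings directly, and num.pop() removes exactly the last (never
-- overwritten) int, so "".join runs over exactly the accumulated strings. Every index i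
-- visited satisfies 0 ≤ i ∧ i+1 < len num, so pyGetD with default 0 is exact.
def solution (m : Int) (n : Int) (desired_sum : Int) : String :=
  let st := (PySem.List.pyRange 1 (m + 1) 1).foldl
      (fun (p : Int × List Int) i => (p.1 + i, p.2 ++ [i])) (0, [])
  let col_sum := st.1
  let num0 := st.2
  let row_sum := desired_sum - col_sum
  let row_num := n - 1
  let num1 := PySem.Int.floordiv row_sum row_num
  let num2 := num1 + PySem.Int.mod row_sum row_num
  let num := ((PySem.List.pyRange 0 (n - 2) 1).foldl (fun l _ => l ++ [num1]) num0) ++ [num2]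
  let num := PySem.List.sorted num (fun x => x) false
  let strs := (PySem.List.pyRange 0 ((num.length : Int) - 1) 1).foldl
      (fun (acc : List String) i =>
        acc ++ [if PySem.List.pyGetD num i 0 == PySem.List.pyGetD num (i + 1) 0 then "R" else "D"]) []
  PySem.Str.join "" strs

-- ===== PORT B =====
-- Source B's hand-written two-pointer merge loop (plus the two trailing extends), transcribed as
-- the standard two-list recursion on the same comparisons.
def mergeInts : List Int → List Int → List Int
  | [], ys => ys
  | x :: xs, [] => x :: xs
  | x :: xs, y :: ys =>
      if x ≤ y then x :: mergeInts xs (y :: ys) else y :: mergeInts (x :: xs) ys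

def solution_alt (m : Int) (n : Int) (desired_sum : Int) : String :=
  let col_sum := if 0 < m then PySem.Int.floordiv (m * (m + 1)) 2 else 0
  let row_sum := desired_sum - col_sum
  let row_num := n - 1
  let num1 := PySem.Int.floordiv row_sum row_num
  let num2 := num1 + PySem.Int.mod row_sum row_num
  let left := PySem.List.pyRange 1 (m + 1) 1
  let right := List.replicate (n - 2).toNat num1 ++ [num2]
  let merged := mergeInts left right
  PySem.Str.join ""
    ((merged.zip merged.tail).map (fun p => if p.1 == p.2 then "R" else "D"))

-- ===== PRECONDITION & SPEC =====
-- Pre_ excludes exactly n = 1, where Python A raises ZeroDivisionError (row_num = 0).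
def Pre_solution (m : Int) (n : Int) (desired_sum : Int) : Prop := n ≠ 1
instance (m : Int) (n : Int) (desired_sum : Int) : Decidable (Pre_solution m n desired_sum) := by
  unfold Pre_solution; infer_instance

def pvWitness_solution : Int × Int × Int := (3, 3, 12)

def Spec_solution (m : Int) (n : Int) (desired_sum : Int) (out : String) : Prop :=
  out = solution_alt m n desired_sum
instance (m : Int) (n : Int) (desired_sum : Int) (out : String) : Decidable (Spec_solution m n desired_sum out) := by
  unfold Spec_solution; infer_instance

-- ===== CLAIM (what is proved, stated in full; the proofs are below) =====
def Claim_equal_solution : Prop := ∀ (m : Int) (n : Int) (desired_sum : Int),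
  Dom_solution m n desired_sum → Pre_solution m n desired_sum →
  Spec_solution m n desired_sum (solution m n desired_sum)

-- ===== LEMMAS AND PROOFS =====

-- A's first loop: accumulating (sum, appended list) over any list.
theorem foldl_sum_append (xs : List Int) (s0 : Int) (l0 : List Int) :
    xs.foldl (fun (p : Int × List Int) i => (p.1 + i, p.2 ++ [i])) (s0, l0)
      = (xs.foldl (· + ·) s0, l0 ++ xs) := by
  induction xs generalizing s0 l0 with
  | nil => simp
  | cons x xs ih => simp [ih]

-- Twice the sum of 1..k.
theorem two_mul_sum_range (k : Nat) :
    2 * (PySem.List.pyRange 1 ((k : Int) + 1) 1).foldl (· + ·) 0 = (k : Int) * ((k : Int) + 1) := by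
  induction k with
  | zero => simp [PySem.List.pyRange_one_eq_nil]
  | succ k ih =>
      have h : PySem.List.pyRange 1 (((k : Int) + 1) + 1) 1
          = PySem.List.pyRange 1 ((k : Int) + 1) 1 ++ [(k : Int) + 1] := by
        exact PySem.List.pyRange_one_succ_right (by omega)
      push_cast
      rw [h, List.foldl_append]
      simp only [List.foldl]
      push_cast at ih
      ring_nf
      ring_nf at ih
      omega

-- A's column sum equals B's guarded Gauss closed form.
theorem col_sum_closed (m : Int) :
    (PySem.List.pyRange 1 (m + 1) 1).foldl (· + ·) 0
      = if 0 < m then PySem.Int.floordiv (m * (m + 1)) 2 else 0 := by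
  by_cases hm : 0 < m
  · have hk : m = ((m.toNat : Int)) := by omega
    rw [if_pos hm]
    have h2 := two_mul_sum_range m.toNat
    rw [← hk] at h2
    rw [PySem.Int.floordiv_eq_ediv_of_pos (by norm_num), ← h2]
    omega
  · rw [if_neg hm, PySem.List.pyRange_one_eq_nil (by omega)]
    rfl

-- A's second loop: appending a constant per element is appending a replicate.
theorem foldl_append_const {α β : Type} (xs : List β) (c : α) (l0 : List α) :
    xs.foldl (fun l _ => l ++ [c]) l0 = l0 ++ List.replicate xs.length c := by
  induction xs generalizing l0 with
  | nil => simp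
  | cons x xs ih =>
      rw [List.foldl_cons, ih, List.length_cons, List.replicate_succ', List.append_assoc]
      congr 1
      show c :: List.replicate xs.length c = _
      rw [← List.replicate_succ, List.replicate_succ']

theorem mergeInts_perm (xs ys : List Int) : (mergeInts xs ys).Perm (xs ++ ys) := by
  fun_induction mergeInts xs ys with
  | case1 ys => simp
  | case2 x xs => simp
  | case3 x xs y ys h ih => simpa using ih.cons x
  | case4 x xs y ys h ih =>
      refine ((ih.cons y).trans ?_)
      exact (List.perm_middle (a := y) (l₁ := x :: xs) (l₂ := ys)).symm

theorem mergeInts_pairwise (xs ys : List Int)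
    (hx : xs.Pairwise (· ≤ ·)) (hy : ys.Pairwise (· ≤ ·)) :
    (mergeInts xs ys).Pairwise (· ≤ ·) := by
  fun_induction mergeInts xs ys with
  | case1 ys => exact hy
  | case2 x xs => exact hx
  | case3 x xs y ys h ih =>
      rw [List.pairwise_cons] at hx ⊢
      refine ⟨?_, ih hx.2 hy⟩
      intro z hz
      have hz' := (mergeInts_perm xs (y :: ys)).mem_iff.mp hz
      rcases List.mem_append.mp hz' with h1 | h1
      · exact hx.1 z h1
      · rcases List.mem_cons.mp h1 with rfl | h2
        · exact h
        · rw [List.pairwise_cons] at hy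
          exact le_trans h (hy.1 z h2)
  | case4 x xs y ys h ih =>
      rw [List.pairwise_cons] at hy ⊢
      refine ⟨?_, ih hx hy.2⟩
      intro z hz
      have hy' : y ≤ x := by omega
      have hz' := (mergeInts_perm (x :: xs) ys).mem_iff.mp hz
      rcases List.mem_append.mp hz' with h1 | h1
      · rcases List.mem_cons.mp h1 with rfl | h2
        · exact hy'
        · rw [List.pairwise_cons] at hx
          exact le_trans hy' (hx.1 z h2)
      · exact hy.1 z h1

-- Adjacent-pair map over indices equals the map over zipped pairs.
theorem range_pairs_eq_zip (xs : List Int) :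
    (List.range (xs.length - 1)).map
      (fun k => if xs.getD k 0 == xs.getD (k + 1) 0 then "R" else "D")
    = (xs.zip xs.tail).map (fun p => if p.1 == p.2 then "R" else "D") := by
  induction xs with
  | nil => simp
  | cons x xs ih =>
      cases xs with
      | nil => simp
      | cons y t =>
          simp only [List.length_cons, Nat.add_sub_cancel, List.range_succ_eq_map,
            List.map_cons, List.map_map, List.zip_cons_cons, List.tail_cons]
          simp only [List.length_cons, Nat.add_sub_cancel] at ih
          congr 1

-- A's final index loop, as a map over the adjacent pairs of the list.
theorem rd_loop_eq_zip (xs : List Int) :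
    (PySem.List.pyRange 0 ((xs.length : Int) - 1) 1).foldl
      (fun (acc : List String) i =>
        acc ++ [if PySem.List.pyGetD xs i 0 == PySem.List.pyGetD xs (i + 1) 0 then "R" else "D"]) []
    = (xs.zip xs.tail).map (fun p => if p.1 == p.2 then "R" else "D") := by
  rw [PySem.List.foldl_append_singleton_eq_map]
  cases xs with
  | nil => simp [PySem.List.pyRange_one_eq_nil (by norm_num : (-1 : Int) ≤ 0)]
  | cons x t =>
      have hlen : (((x :: t).length : Int) - 1) = (((x :: t).length - 1 : Nat) : Int) := by
        simp
      rw [hlen, PySem.List.pyRange_zero_nat, List.map_map]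
      rw [← range_pairs_eq_zip (x :: t)]
      apply List.map_congr_left
      intro k hk
      have h1 : ((k : Nat) : Int) + 1 = ((k + 1 : Nat) : Int) := by push_cast; ring
      simp only [Function.comp_apply, PySem.List.pyGetD_natCast, h1]

-- The right run B merges is sorted.
theorem right_pairwise (k : Nat) (a b : Int) (h : k = 0 ∨ a ≤ b) :
    (List.replicate k a ++ [b]).Pairwise (· ≤ ·) := by
  rcases h with rfl | hab
  · simp
  · apply List.pairwise_append.mpr
    refine ⟨List.pairwise_replicate.mpr (by simp), by simp, ?_⟩
    intro x hx y hy
    rw [List.eq_of_mem_replicate hx, List.mem_singleton.mp hy]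
    exact hab

theorem pyRange_pairwise_le (a b : Int) :
    (PySem.List.pyRange a b 1).Pairwise (· ≤ ·) :=
  (PySem.List.pairwise_lt_pyRange_one a b).imp (fun h => le_of_lt h)

-- Main equivalence.
theorem solution_eq (m n desired_sum : Int) :
    solution m n desired_sum = solution_alt m n desired_sum := by
  simp only [solution, solution_alt, foldl_sum_append, foldl_append_const, List.nil_append,
    PySem.List.length_pyRange_one, col_sum_closed, sub_zero]
  set cs := (if 0 < m then PySem.Int.floordiv (m * (m + 1)) 2 else 0) with hcs
  set num1 := PySem.Int.floordiv (desired_sum - cs) (n - 1) with hnum1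
  set num2 := num1 + PySem.Int.mod (desired_sum - cs) (n - 1) with hnum2
  set left := PySem.List.pyRange 1 (m + 1) 1 with hleft
  have hsorted :
      PySem.List.sorted ((left ++ List.replicate (n - 2).toNat num1) ++ [num2]) (fun x => x) false
        = mergeInts left (List.replicate (n - 2).toNat num1 ++ [num2]) := by
    apply PySem.List.sorted_id_eq_of_perm_of_pairwise
    · exact (mergeInts_perm _ _).trans (by rw [List.append_assoc])
    · apply mergeInts_pairwise
      · exact pyRange_pairwise_le 1 (m + 1)
      · apply right_pairwise
        by_cases hn : 3 ≤ n
        · right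
          have := PySem.Int.mod_nonneg (desired_sum - cs) (show (0 : Int) < n - 1 by omega)
          omega
        · left; omega
  simp only [hsorted]
  rw [rd_loop_eq_zip]

-- ===== VERDICT (by name: the statement is the Claim_ definition above) =====
theorem solution_spec : Claim_equal_solution := by
  intro m n desired_sum _ _
  unfold Spec_solution
  exact solution_eq m n desired_sum
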